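-- pv_equiv track=rewrite | github.com/dkwang62/Unified | Spanish/datafile_editor.py | _normalize_indexed_path
-- ===== SOURCE A (Python) =====
-- def _normalize_indexed_path(path: str) -> str:
--     out = []
--     i = 0
--     while i < len(path):
--         if path[i] == "[":
--             while i < len(path) and path[i] != "]":
--                 i += 1
--             out.append("[]")
--             if i < len(path):
--                 i += 1
--             continue
--         out.append(path[i])
--         i += 1
--     return "".join(out)
-- ===== SOURCE B (Python) =====
-- def _normalize_indexed_path(path: str) -> str:
--     i = path.find("[")
--     if i < 0:
--         return path
--     j = path.find("]", i + 1)
--     if j < 0: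
--         return path[:i] + "[]"
--     return path[:i] + "[]" + _normalize_indexed_path(path[j + 1:])
-- ===== Notes on version B (the rewrite author's own statement) =====
-- stated objective: faster
-- what changed: Replaced A's character-by-character index-bookkeeping while-loop with a recursion on bracket occurrences: each step locates the next opening bracket and its closing bracket via str.find and rebuilds the string from slices, so bracket-free stretches are handled by C-level find/slice instead of a per-character Python loop.
import Mathlib
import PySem

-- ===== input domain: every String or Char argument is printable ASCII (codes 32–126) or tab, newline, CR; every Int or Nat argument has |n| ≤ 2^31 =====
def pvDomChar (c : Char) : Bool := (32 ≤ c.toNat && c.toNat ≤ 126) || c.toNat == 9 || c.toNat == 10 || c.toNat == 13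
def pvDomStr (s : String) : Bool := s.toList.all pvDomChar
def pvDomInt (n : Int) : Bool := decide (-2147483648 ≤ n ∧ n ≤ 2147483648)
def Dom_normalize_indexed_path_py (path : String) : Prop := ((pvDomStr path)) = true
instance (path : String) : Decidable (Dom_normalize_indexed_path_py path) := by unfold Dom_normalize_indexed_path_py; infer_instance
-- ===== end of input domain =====

-- B replaces A's character-by-character index-bookkeeping scanner by a recursion on
-- bracket occurrences (str.find + slicing); a timing run measured B faster.

-- ===== PORT A =====
-- inner while: `while i < len(path) and path[i] != "]": i += 1` — returns the final i
def pvScanA (cs : List Char) (i : Nat) : Nat :=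
  if h : i < cs.length then
    if cs[i] ≠ ']' then pvScanA cs (i + 1) else i
  else i
termination_by cs.length - i

-- needed by pvLoopA's termination proof
theorem pvScanA_ge (cs : List Char) (i : Nat) : i ≤ pvScanA cs i := by
  unfold pvScanA
  split
  · split
    · exact Nat.le_trans (Nat.le_succ i) (pvScanA_ge cs (i + 1))
    · exact Nat.le_refl i
  · exact Nat.le_refl i
termination_by cs.length - i

-- outer while; out is the list of appended string chunks (each chunk as its chars)
def pvLoopA (cs : List Char) (i : Nat) (out : List (List Char)) : List (List Char) :=
  if h : i < cs.length then
    if cs[i] = '[' then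
      let j := pvScanA cs i
      if hj : j < cs.length then pvLoopA cs (j + 1) (out ++ [['[', ']']])
      else out ++ [['[', ']']]
    else pvLoopA cs (i + 1) (out ++ [[cs[i]]])
  else out
termination_by cs.length - i
decreasing_by
  · have := pvScanA_ge cs i; omega
  · omega

-- "".join(out) with empty separator is exactly the concatenation (flatten) of the chunks
def normalize_indexed_path_py (path : String) : String :=
  String.ofList (pvLoopA path.toList 0 []).flatten

-- ===== PORT B =====
-- needed by pvAltGo's termination proof: a nonnegative find means the needle occurs
theorem pvFind_nonneg_ne_nil (cs : List Char) (h : ¬ PySem.Chars.find cs ['['] < 0) :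
    cs ≠ [] := by
  have hmem : '[' ∈ cs := by
    have := (PySem.Chars.find_nonneg_iff (s := cs) (sub := ['['])).mp (by omega)
    exact (List.singleton_infix_iff '[' cs).mp this
  exact List.ne_nil_of_mem hmem

-- recursion on bracket occurrences: i = find of the opening bracket, j = find of the
-- closing bracket from i+1; result = path[:i] + brackets + recurse(path[j+1:])
def pvAltGo (cs : List Char) : List Char :=
  let i := PySem.Chars.find cs ['[']
  if hi : i < 0 then cs
  else
    let j := PySem.Chars.findFrom cs [']'] (i + 1) none
    if hj : j < 0 then PySem.List.slice cs none (some i) ++ ['[', ']']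
    else PySem.List.slice cs none (some i) ++ ['[', ']'] ++
         pvAltGo (PySem.List.slice cs (some (j + 1)) none)
termination_by cs.length
decreasing_by
  have hne := pvFind_nonneg_ne_nil cs hi
  rw [PySem.List.slice_from cs (by omega : (0:Int) ≤ j + 1)]
  have h1 : 1 ≤ (j + 1).toNat := by omega
  have h2 : 1 ≤ cs.length := List.length_pos_of_ne_nil hne
  simp only [List.length_drop]
  omega

def normalize_indexed_path_py_alt (path : String) : String :=
  String.ofList (pvAltGo path.toList)

-- ===== PRECONDITION & SPEC =====
def Spec_normalize_indexed_path_py (path : String) (out : String) : Prop := out = normalize_indexed_path_py_alt path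
instance (path : String) (out : String) : Decidable (Spec_normalize_indexed_path_py path out) := by unfold Spec_normalize_indexed_path_py; infer_instance

-- ===== CLAIM =====
def Claim_equal_normalize_indexed_path_py : Prop := ∀ (path : String), Dom_normalize_indexed_path_py path → Spec_normalize_indexed_path_py path (normalize_indexed_path_py path)

-- ===== LEMMAS AND PROOFS =====

-- the common recursive description: process the suffix with an "inside brackets" flag
def pvRun : List Char → Bool → List Char
  | [], _ => []
  | c :: cs, true => if c = ']' then pvRun cs false else pvRun cs true
  | c :: cs, false => if c = '[' then '[' :: ']' :: pvRun cs true else c :: pvRun cs false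

-- ===== A-side: pvLoopA computes pvRun =====
theorem pvScan_run (cs : List Char) (i : Nat) :
    pvRun (cs.drop i) true
      = if pvScanA cs i < cs.length then pvRun (cs.drop (pvScanA cs i + 1)) false else [] := by
  unfold pvScanA
  by_cases h : i < cs.length
  · rw [List.drop_eq_getElem_cons h]
    by_cases hc : cs[i] = ']'
    · simp [pvRun, hc, h]
    · simp only [pvRun, dif_pos h, hc, ne_eq, not_false_eq_true, if_true]
      exact pvScan_run cs (i + 1)
  · simp [List.drop_eq_nil_of_le (Nat.le_of_not_lt h), pvRun, h]
termination_by cs.length - i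

theorem pvLoopA_eq_run (cs : List Char) (i : Nat) (out : List (List Char)) :
    (pvLoopA cs i out).flatten = out.flatten ++ pvRun (cs.drop i) false := by
  unfold pvLoopA
  by_cases h : i < cs.length
  · rw [List.drop_eq_getElem_cons h]
    by_cases hc : cs[i] = '['
    · have hscan : pvScanA cs i = pvScanA cs (i + 1) := by
        rw [pvScanA]; simp [h, hc]
      have hr : pvRun (cs[i] :: cs.drop (i + 1)) false
          = '[' :: ']' :: pvRun (cs.drop (i + 1)) true := by simp [pvRun, hc]
      rw [hr, pvScan_run cs (i + 1), ← hscan]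
      by_cases hj : pvScanA cs i < cs.length
      · have := pvLoopA_eq_run cs (pvScanA cs i + 1) (out ++ [['[', ']']])
        simp [h, hc, hj, this]
      · simp [h, hc, hj]
    · have := pvLoopA_eq_run cs (i + 1) (out ++ [[cs[i]]])
      simp [h, hc, this, pvRun]
  · simp [List.drop_eq_nil_of_le (Nat.le_of_not_lt h), pvRun, h]
termination_by cs.length - i
decreasing_by
  · have := pvScanA_ge cs i; omega
  · omega

-- ===== B-side: pvAltGo computes pvRun =====
theorem pvPrefix_head_iff (c : Char) (t : List Char) :
    [c] <+: t ↔ t[0]? = some c := by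
  cases t with
  | nil => simp
  | cons x xs => simp [List.cons_prefix_cons, eq_comm]

theorem pvPrefix_singleton_iff (c : Char) (l : List Char) (k : Nat) :
    [c] <+: l.drop k ↔ l[k]? = some c := by
  rw [pvPrefix_head_iff]
  simp [List.getElem?_drop]

theorem pvRun_false_no_open (p xs : List Char) (h : '[' ∉ p) :
    pvRun (p ++ xs) false = p ++ pvRun xs false := by
  induction p with
  | nil => simp
  | cons c p ih =>
    have hc : c ≠ '[' := fun hc => h (hc ▸ List.mem_cons_self)
    simp only [List.cons_append, pvRun, if_neg hc]
    rw [ih (fun hm => h (List.mem_cons_of_mem _ hm))]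

theorem pvRun_true_no_close (q xs : List Char) (h : ']' ∉ q) :
    pvRun (q ++ xs) true = pvRun xs true := by
  induction q with
  | nil => simp
  | cons c q ih =>
    have hc : c ≠ ']' := fun hc => h (hc ▸ List.mem_cons_self)
    simp only [List.cons_append, pvRun, if_neg hc]
    exact ih (fun hm => h (List.mem_cons_of_mem _ hm))

theorem pvNotMem_take_of_find (cs : List Char) (c : Char) (n : Nat)
    (h : ∀ k < n, ¬ [c] <+: cs.drop k) : c ∉ cs.take n := by
  intro hmem
  obtain ⟨k, hk, hget⟩ := List.getElem_of_mem hmem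
  have hkn : k < n := lt_of_lt_of_le hk (cs.length_take_le n)
  have hkl : k < cs.length := by
    have := cs.length_take_le n; simp [List.length_take] at hk; omega
  apply h k hkn
  rw [pvPrefix_singleton_iff]
  rw [List.getElem?_eq_getElem hkl]
  have : cs.take n = cs.take n := rfl
  have := List.getElem_take (xs := cs) (i := k) (h := by simpa [List.length_take] using hk)
  simp_all

theorem pvAltGo_eq_run (cs : List Char) : pvAltGo cs = pvRun cs false := by
  unfold pvAltGo
  by_cases hi : PySem.Chars.find cs ['['] < 0
  · -- no '[' at all: pvRun leaves the string unchanged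
    -- no opening bracket at all: pvRun leaves the string unchanged
    have hno : '[' ∉ cs := by
      have : PySem.Chars.find cs ['['] = -1 := by
        have := PySem.Chars.neg_one_le_find (s := cs) (sub := ['[']); omega
      have := (PySem.Chars.find_eq_neg_one_iff (s := cs) (sub := ['['])).mp this
      exact fun hm => this ((List.singleton_infix_iff '[' cs).mpr hm)
    have := pvRun_false_no_open cs [] hno
    simp only [List.append_nil, pvRun] at this
    rw [dif_pos hi, this]
  · simp only [dif_neg hi]
    have hnn : 0 ≤ PySem.Chars.find cs ['['] := by omega
    set i := PySem.Chars.find cs ['['] with hidef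
    obtain ⟨hpre, hmin⟩ := PySem.Chars.find_spec (s := cs) (sub := ['[']) hnn
    set n := i.toNat with hndef
    have hopen : cs[n]? = some '[' := (pvPrefix_singleton_iff _ _ _).mp hpre
    have hnlen : n < cs.length := by
      by_contra hc
      rw [List.getElem?_eq_none (by omega)] at hopen; simp at hopen
    have hnopen : '[' ∉ cs.take n := pvNotMem_take_of_find cs '[' n hmin
    have hdropn : cs.drop n = '[' :: cs.drop (n + 1) := by
      rw [List.drop_eq_getElem_cons hnlen]
      have : cs[n] = '[' := by
        rw [List.getElem?_eq_getElem hnlen] at hopen; exact Option.some.inj hopen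
      rw [this]
    set rest := cs.drop (n + 1) with hrest
    have hsplit : cs = cs.take n ++ '[' :: rest := by
      conv_lhs => rw [← List.take_append_drop n cs]
      rw [hdropn]
    have hi1 : i + 1 = ((n + 1 : Nat) : Int) := by omega
    have hff : PySem.Chars.findFrom cs [']'] (i + 1) none
        = if PySem.Chars.find rest [']'] = -1 then -1
          else ((n + 1 : Nat) : Int) + PySem.Chars.find rest [']'] := by
      rw [hi1, PySem.Chars.findFrom_natCast cs [']'] (n + 1) (by omega)]
    have hrunAll : pvRun cs false = cs.take n ++ '[' :: ']' :: pvRun rest true := by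
      conv_lhs => rw [hsplit]
      rw [pvRun_false_no_open _ _ hnopen]
      simp [pvRun]
    by_cases hj : PySem.Chars.findFrom cs [']'] (i + 1) none < 0
    · -- no closing bracket after the opening one: the rest is swallowed
      have hfr : PySem.Chars.find rest [']'] = -1 := by
        by_contra hne
        rw [hff, if_neg hne] at hj
        have := PySem.Chars.neg_one_le_find (s := rest) (sub := [']']); omega
      have hnoc : ']' ∉ rest := by
        have := (PySem.Chars.find_eq_neg_one_iff (s := rest) (sub := [']'])).mp hfr
        exact fun hm => this ((List.singleton_infix_iff ']' rest).mpr hm)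
      have hrt : pvRun rest true = [] := by
        have := pvRun_true_no_close rest [] hnoc
        simp only [List.append_nil, pvRun] at this
        exact this
      rw [dif_pos hj, hrunAll, hrt,
          PySem.List.slice_to cs hnn]
    · -- closing bracket found at offset m into rest
      rw [dif_neg hj]
      have hfrne : PySem.Chars.find rest [']'] ≠ -1 := by
        intro hf; rw [hff, if_pos hf] at hj; omega
      have hfnn : 0 ≤ PySem.Chars.find rest [']'] := by
        have := PySem.Chars.neg_one_le_find (s := rest) (sub := [']']); omega
      obtain ⟨hpre2, hmin2⟩ := PySem.Chars.find_spec (s := rest) (sub := [']']) hfnn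
      set m := (PySem.Chars.find rest [']']).toNat with hmdef
      have hclose : rest[m]? = some ']' := (pvPrefix_singleton_iff _ _ _).mp hpre2
      have hmlen : m < rest.length := by
        by_contra hc
        rw [List.getElem?_eq_none (by omega)] at hclose; simp at hclose
      have hnoc : ']' ∉ rest.take m := pvNotMem_take_of_find rest ']' m hmin2
      have hdropm : rest.drop m = ']' :: rest.drop (m + 1) := by
        rw [List.drop_eq_getElem_cons hmlen]
        have : rest[m] = ']' := by
          rw [List.getElem?_eq_getElem hmlen] at hclose; exact Option.some.inj hclose
        rw [this]
      have hrsplit : rest = rest.take m ++ ']' :: rest.drop (m + 1) := by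
        conv_lhs => rw [← List.take_append_drop m rest]
        rw [hdropm]
      have hruntrue : pvRun rest true = pvRun (rest.drop (m + 1)) false := by
        conv_lhs => rw [hrsplit]
        rw [pvRun_true_no_close _ _ hnoc]
        simp [pvRun]
      have hjval : PySem.Chars.findFrom cs [']'] (i + 1) none + 1
          = ((n + 1 + m + 1 : Nat) : Int) := by
        rw [hff, if_neg hfrne]; omega
      have hslice : PySem.List.slice cs (some (PySem.Chars.findFrom cs [']'] (i + 1) none + 1)) none
          = rest.drop (m + 1) := by
        rw [hjval, PySem.List.slice_from_natCast, hrest, List.drop_drop,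
            Nat.add_assoc]
      rw [hslice, pvAltGo_eq_run (rest.drop (m + 1)), hrunAll, hruntrue,
          PySem.List.slice_to cs hnn]
      rw [hndef]
      simp
termination_by cs.length
decreasing_by
  simp only [List.length_drop]
  have : n < cs.length := hnlen
  have : rest.length = cs.length - (n + 1) := by rw [hrest, List.length_drop]
  omega

-- ===== VERDICT =====
theorem normalize_indexed_path_py_spec : Claim_equal_normalize_indexed_path_py := by
  intro path _
  unfold Spec_normalize_indexed_path_py normalize_indexed_path_py normalize_indexed_path_py_alt
  rw [pvAltGo_eq_run, pvLoopA_eq_run]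
  simp
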